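-- pv_equiv track=rewrite | github.com/egeaybars123/nns_telegram_bot | main.py | check_proposals
-- ===== SOURCE A (Python) =====
-- def check_proposals(old, new):
--     count = 0
--     message_proposals = []
--     id_old = old[0].split(" ")[0]
--     for new_prop in new:
--         id_new = new_prop.split(" ")[0]
--         if id_old == id_new and count != 0:
--             message_proposals = new[0: count]
--             break
--         count += 1
--
--     return message_proposals
-- ===== SOURCE B (Python) =====
-- def check_proposals(old, new):
--     id_old = old[0].split(" ")[0]
--     found = False
--     acc = []
--     for p in reversed(new[1:]):
--         if p.split(" ")[0] == id_old:
--             found = True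
--             acc = []
--         elif found:
--             acc.append(p)
--     if not found:
--         return []
--     acc.append(new[0])
--     acc.reverse()
--     return acc
-- ===== Notes on version B (the rewrite author's own statement) =====
-- stated objective: alternative
-- what changed: Replaces A's forward counter-loop with break and slice by a right-to-left fold over new[1:] that remembers the earliest match seen and accumulates the prefix by construction (reversed at the end), with no counter, no index and no slice.
import Mathlib
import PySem

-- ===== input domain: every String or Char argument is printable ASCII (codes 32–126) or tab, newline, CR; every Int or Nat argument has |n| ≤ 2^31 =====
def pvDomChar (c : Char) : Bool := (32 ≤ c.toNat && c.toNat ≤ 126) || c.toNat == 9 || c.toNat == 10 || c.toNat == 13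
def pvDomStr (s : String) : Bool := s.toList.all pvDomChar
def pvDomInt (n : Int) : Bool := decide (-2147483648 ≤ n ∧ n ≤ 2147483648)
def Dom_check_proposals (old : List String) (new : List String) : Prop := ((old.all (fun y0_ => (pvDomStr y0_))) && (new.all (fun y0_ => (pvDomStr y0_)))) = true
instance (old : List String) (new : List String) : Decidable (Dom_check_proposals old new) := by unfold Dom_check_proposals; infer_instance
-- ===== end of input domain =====

-- B replaces A's forward counter-loop with break and slice by a right-to-left fold over
-- new[1:] that remembers the earliest match and builds the prefix by construction (objective: alternative).

-- ===== PORT A =====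
-- s.split(" ")[0]; splitOn with a nonempty separator always yields at least one piece, so [0] never raises
def pvTokA (s : String) : String := (PySem.List.pyGet? ((PySem.Str.split? s " ").getD []) 0).getD ""

-- the for-loop of A: state = (count, remaining suffix of new); break returns new[0:count]
def pvLoopA (id_old : String) (new : List String) : Nat → List String → List String
  | _, [] => []
  | count, p :: rest =>
    if pvTokA p = id_old ∧ count ≠ 0 then PySem.List.slice new (some 0) (some (count : Int))
    else pvLoopA id_old new (count + 1) rest

def check_proposals (old : List String) (new : List String) : List String :=
  let id_old := pvTokA ((PySem.List.pyGet? old 0).getD "")   -- old[0]: Pre_ guarantees old ≠ []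
  pvLoopA id_old new 0 new

-- ===== PORT B =====
def pvTokB (s : String) : String := (PySem.List.pyGet? ((PySem.Str.split? s " ").getD []) 0).getD ""

-- the loop body of B: state = (found, acc)
def pvStepB (id_old : String) (st : Bool × List String) (p : String) : Bool × List String :=
  if pvTokB p = id_old then (true, [])
  else if st.1 then (st.1, st.2 ++ [p]) else st

def check_proposals_alt (old : List String) (new : List String) : List String :=
  let id_old := pvTokB ((PySem.List.pyGet? old 0).getD "")
  -- for p in reversed(new[1:]): …
  let s := ((PySem.List.slice new (some 1) none).reverse).foldl (pvStepB id_old) (false, [])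
  -- new[0] is only read when found = true, hence new ≠ []; getD "" is never the result
  if s.1 then (s.2 ++ [(PySem.List.pyGet? new 0).getD ""]).reverse else []

-- ===== PRECONDITION & SPEC =====
-- A raises IndexError on old = [] (old[0]); exactly those inputs are excluded.
def Pre_check_proposals (old : List String) (new : List String) : Prop := old ≠ []
instance (old : List String) (new : List String) : Decidable (Pre_check_proposals old new) := by unfold Pre_check_proposals; infer_instance
def pvWitness_check_proposals : List String × List String := (["5 x"], ["5 a", "3 b", "5 c"])

def Spec_check_proposals (old : List String) (new : List String) (out : List String) : Prop := out = check_proposals_alt old new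
instance (old : List String) (new : List String) (out : List String) : Decidable (Spec_check_proposals old new out) := by unfold Spec_check_proposals; infer_instance

-- ===== CLAIM (what is proved, stated in full; the proofs are below) =====
def Claim_equal_check_proposals : Prop := ∀ (old : List String) (new : List String), Dom_check_proposals old new → Pre_check_proposals old new → Spec_check_proposals old new (check_proposals old new)

-- ===== LEMMAS AND PROOFS =====

-- A's loop, entered with counter c ≥ 1, is the index search over the mapped suffix plus a slice
theorem pvLoopA_eq (id_old : String) (full : List String) (rest : List String) :
    ∀ c : Nat, 1 ≤ c →
      pvLoopA id_old full c rest =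
        (match PySem.List.index? (rest.map pvTokA) id_old with
         | some i => PySem.List.slice full (some 0) (some ((c : Int) + (i : Int)))
         | none => []) := by
  induction rest with
  | nil => intro c _; rfl
  | cons p rest ih =>
    intro c hc
    by_cases h : pvTokA p = id_old
    · rw [List.map_cons, h, PySem.List.index?_cons_self]
      simp [pvLoopA, h]
      exact fun h0 => absurd h0 (by omega)
    · rw [List.map_cons, PySem.List.index?_cons_of_ne _ h]
      simp only [pvLoopA, h, false_and, if_false]
      rw [ih (c + 1) (by omega)]
      cases hi : PySem.List.index? (rest.map pvTokA) id_old with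
      | none => simp [hi]
      | some i =>
        simp only [hi, Option.map_some]
        push_cast
        ring_nf

-- B's fold over the reversed tail, seen as a right fold, is the index search plus a reversed take
theorem pvFoldB_eq (id_old : String) (l : List String) :
    (l.reverse).foldl (pvStepB id_old) (false, []) =
      (match PySem.List.index? (l.map pvTokB) id_old with
       | some i => (true, (l.take i).reverse)
       | none => ((false : Bool), ([] : List String))) := by
  rw [List.foldl_reverse]
  induction l with
  | nil => rfl
  | cons p rest ih =>
    rw [List.foldr_cons, ih]
    by_cases h : pvTokB p = id_old
    · rw [List.map_cons, h, PySem.List.index?_cons_self]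
      cases hi : PySem.List.index? (rest.map pvTokB) id_old with
      | none => simp [pvStepB, h]
      | some i => simp [pvStepB, h]
    · rw [List.map_cons, PySem.List.index?_cons_of_ne _ h]
      cases hi : PySem.List.index? (rest.map pvTokB) id_old with
      | none => simp [pvStepB, h]
      | some i => simp [pvStepB, h]

theorem check_proposals_spec : Claim_equal_check_proposals := by
  intro old new _ _
  unfold Spec_check_proposals check_proposals check_proposals_alt
  show pvLoopA _ _ 0 new = _
  have htok : pvTokB = pvTokA := rfl
  cases new with
  | nil => rfl
  | cons x rest =>
    have h0 : pvLoopA (pvTokA ((PySem.List.pyGet? old 0).getD "")) (x :: rest) 0 (x :: rest)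
        = pvLoopA (pvTokA ((PySem.List.pyGet? old 0).getD "")) (x :: rest) 1 rest := by
      simp [pvLoopA]
    rw [h0, pvLoopA_eq _ _ _ 1 le_rfl]
    rw [PySem.List.slice_from_one, List.tail_cons]
    simp only [pvFoldB_eq, htok]
    cases hi : PySem.List.index? (rest.map pvTokA) (pvTokA ((PySem.List.pyGet? old 0).getD "")) with
    | none => simp [hi]
    | some i =>
      simp only [hi, PySem.List.slice_zero_start, if_true]
      have h1 : ((1 : Nat) : Int) + (i : Int) = ((i + 1 : Nat) : Int) := by push_cast; ring
      rw [h1, PySem.List.slice_to_natCast]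
      simp [PySem.List.pyGet?, PySem.List.pyIdx?]
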